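-- pv_equiv track=rewrite | github.com/rpalcab/icefinder2 | script/process.py | scanf
-- ===== SOURCE A (Python) =====
-- from typing import List, Union, Optional, Tuple, Dict
--
-- def scanf(hmmlist: List) -> bool:
--
-- 	ice_count = []
-- 	for line in hmmlist:
-- 		if 'MOB' in line:
-- 			ice_count.append('MOB')
-- 		elif 't4cp' in line or 'tcpA' in line:
-- 			ice_count.append('t4cp')
-- 		elif 'FA' in line:
-- 			ice_count.append('T4SS')
-- 		elif line in [
-- 					 'Phage_integrase', 'UPF0236',
-- 					 'Recombinase', 'rve', 'TIGR02224',
-- 					 'TIGR02249', 'TIGR02225', 'PB001819'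
-- 					 ]:
-- 			ice_count.append('Int')
-- 		else:
-- 			ice_count.append('T4SS')
-- 	if ice_count.count('MOB') and ice_count.count('t4cp') and ice_count.count('Int') and ice_count.count('T4SS') >= 5:
-- 		return True
-- 	else:
-- 		return False
-- ===== SOURCE B (Python) =====
-- INT_NAMES = frozenset(['Phage_integrase', 'UPF0236', 'Recombinase', 'rve',
--                        'TIGR02224', 'TIGR02249', 'TIGR02225', 'PB001819'])
--
-- def scanf(hmmlist):
--     # Staged counting passes; the T4SS count is derived arithmetically as the
--     # complement of the other three categories (the 'FA' test vanishes: both the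
--     # 'FA' branch and the else branch of the original classify as T4SS, and the
--     # eight integrase names contain none of the earlier substrings).
--     n = len(hmmlist)
--     mob = sum('MOB' in l for l in hmmlist)
--     t4cp = sum('MOB' not in l and ('t4cp' in l or 'tcpA' in l) for l in hmmlist)
--     intc = sum(l in INT_NAMES for l in hmmlist)
--     return mob > 0 and t4cp > 0 and intc > 0 and n - mob - t4cp - intc >= 5
-- ===== Notes on version B (the rewrite author's own statement) =====
-- stated objective: simpler
-- what changed: B replaces the classification loop + list + four .count() rescans by three staged counting passes over the input; the T4SS count is never computed by classification at all but derived arithmetically as len(hmmlist) - mob - t4cp - intc (the 'FA' branch disappears, since both it and the else branch classify as T4SS, and the eight integrase names contain none of the earlier substrings).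
import Mathlib
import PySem

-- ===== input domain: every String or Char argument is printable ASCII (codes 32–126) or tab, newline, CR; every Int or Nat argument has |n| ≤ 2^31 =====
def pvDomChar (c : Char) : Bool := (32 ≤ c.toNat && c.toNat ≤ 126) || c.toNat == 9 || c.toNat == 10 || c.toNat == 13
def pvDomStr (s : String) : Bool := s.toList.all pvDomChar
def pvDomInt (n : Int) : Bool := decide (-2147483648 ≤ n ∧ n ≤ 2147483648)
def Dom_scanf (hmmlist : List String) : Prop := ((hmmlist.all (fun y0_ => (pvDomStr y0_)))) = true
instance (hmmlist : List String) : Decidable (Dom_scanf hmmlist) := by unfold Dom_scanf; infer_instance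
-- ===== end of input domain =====

-- B replaces A's classification loop + list + four .count() rescans by three staged counting
-- passes; the T4SS count is derived arithmetically as the complement (simpler).

-- ===== PORT A =====
-- A: build the list of category tags, then test the four counts.
def scanfTag (line : String) : String :=
  if PySem.Str.isIn "MOB" line then "MOB"
  else if PySem.Str.isIn "t4cp" line || PySem.Str.isIn "tcpA" line then "t4cp"
  else if PySem.Str.isIn "FA" line then "T4SS"
  else if ["Phage_integrase", "UPF0236", "Recombinase", "rve", "TIGR02224",
           "TIGR02249", "TIGR02225", "PB001819"].contains line then "Int"
  else "T4SS"

def scanf (hmmlist : List String) : Bool :=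
  let ice_count := hmmlist.foldl (fun acc line => acc ++ [scanfTag line]) ([] : List String)
  if PySem.List.count ice_count "MOB" ≠ 0 ∧ PySem.List.count ice_count "t4cp" ≠ 0 ∧
     PySem.List.count ice_count "Int" ≠ 0 ∧ PySem.List.count ice_count "T4SS" ≥ 5
  then true else false

-- ===== PORT B =====
def scanfIntNames : List String :=
  ["Phage_integrase", "UPF0236", "Recombinase", "rve", "TIGR02224",
   "TIGR02249", "TIGR02225", "PB001819"]

-- B: three staged counting passes; T4SS count by arithmetic complement.
def scanf_alt (hmmlist : List String) : Bool :=
  let n : Int := hmmlist.length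
  let mob : Int := hmmlist.countP (fun l => PySem.Str.isIn "MOB" l)
  let t4cp : Int := hmmlist.countP (fun l =>
    !PySem.Str.isIn "MOB" l && (PySem.Str.isIn "t4cp" l || PySem.Str.isIn "tcpA" l))
  let intc : Int := hmmlist.countP (fun l => scanfIntNames.contains l)
  decide (mob > 0) && decide (t4cp > 0) && decide (intc > 0) &&
    decide (n - mob - t4cp - intc ≥ 5)

-- ===== PRECONDITION & SPEC =====
def Spec_scanf (hmmlist : List String) (out : Bool) : Prop := out = scanf_alt hmmlist
instance (hmmlist : List String) (out : Bool) : Decidable (Spec_scanf hmmlist out) := by unfold Spec_scanf; infer_instance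

-- ===== CLAIM (what is proved, stated in full; the proofs are below) =====
def Claim_equal_scanf : Prop := ∀ (hmmlist : List String), Dom_scanf hmmlist → Spec_scanf hmmlist (scanf hmmlist)

-- ===== LEMMAS AND PROOFS =====

lemma scanfTag_cases (x : String) :
    scanfTag x = "MOB" ∨ scanfTag x = "t4cp" ∨ scanfTag x = "Int" ∨ scanfTag x = "T4SS" := by
  unfold scanfTag; split_ifs <;> simp

-- pointwise characterisation of the three tags B counts directly
lemma tag_mob (x : String) :
    (scanfTag x == "MOB") = PySem.Str.isIn "MOB" x := by
  unfold scanfTag; split_ifs <;> simp_all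

lemma tag_t4cp (x : String) :
    (scanfTag x == "t4cp")
      = (!PySem.Str.isIn "MOB" x && (PySem.Str.isIn "t4cp" x || PySem.Str.isIn "tcpA" x)) := by
  unfold scanfTag; split_ifs <;> simp_all

lemma tag_int (x : String) :
    (scanfTag x == "Int") = scanfIntNames.contains x := by
  by_cases hx : scanfIntNames.contains x = true
  · rw [hx]
    simp [scanfIntNames] at hx
    rcases hx with h|h|h|h|h|h|h|h <;> subst h <;> decide
  · simp only [Bool.not_eq_true] at hx
    rw [hx]
    unfold scanfTag
    split_ifs with a b c d <;> simp_all [scanfIntNames]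

-- the four tag-counts partition the list
lemma tag_count_sum (l : List String) :
    l.countP (fun x => scanfTag x == "MOB") + l.countP (fun x => scanfTag x == "t4cp")
      + l.countP (fun x => scanfTag x == "Int") + l.countP (fun x => scanfTag x == "T4SS")
      = l.length := by
  induction l with
  | nil => simp
  | cons hd tl ih =>
    simp only [List.countP_cons, List.length_cons]
    rcases scanfTag_cases hd with h|h|h|h <;> simp [h] <;> omega

-- ===== VERDICT (by name: the statement is the Claim_ definition above) =====
theorem scanf_spec : Claim_equal_scanf := by
  intro hmmlist _
  unfold Spec_scanf scanf scanf_alt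
  simp only [PySem.List.foldl_append_singleton_eq_map, List.nil_append,
    PySem.List.count_eq, List.count_eq_countP, List.countP_map, Function.comp_def]
  have hP : ∀ (P : Prop) [Decidable P], (if P then true else false) = decide P := by
    intro P _; split_ifs with h <;> simp [h]
  rw [hP]
  have hsum := tag_count_sum hmmlist
  simp only [tag_mob, tag_t4cp, tag_int] at hsum ⊢
  simp only [← Bool.decide_and]
  rw [decide_eq_decide]
  omega
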